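-- pv_equiv track=rewrite | github.com/dkarthicks27/ML_Database | codeforces/omkar and infinity clock.py | solve
-- ===== SOURCE A (Python) =====
-- def solve(arr, k):
--     largest = max(arr)
--     new_arr = [largest - i for i in arr]
--     if k % 2 == 1:
--         return new_arr
--     else:
--         largest = max(new_arr)
--         return [largest - i for i in new_arr]
-- ===== SOURCE B (Python) =====
-- def solve(arr, k):
--     mn = mx = arr[0]
--     for x in arr[1:]:
--         if x < mn:
--             mn = x
--         elif x > mx:
--             mx = x
--     if k % 2:
--         return [mx - x for x in arr]
--     return [x - mn for x in arr]
-- ===== Notes on version B (the rewrite author's own statement) =====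
-- stated objective: alternative
-- what changed: Replaces A's three staged passes (max, intermediate reflected list, max of it again) by one explicit loop carrying (min, max) as an accumulator, then a single map per parity branch using the algebraic collapse of the even case to x - min(arr).
import Mathlib
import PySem

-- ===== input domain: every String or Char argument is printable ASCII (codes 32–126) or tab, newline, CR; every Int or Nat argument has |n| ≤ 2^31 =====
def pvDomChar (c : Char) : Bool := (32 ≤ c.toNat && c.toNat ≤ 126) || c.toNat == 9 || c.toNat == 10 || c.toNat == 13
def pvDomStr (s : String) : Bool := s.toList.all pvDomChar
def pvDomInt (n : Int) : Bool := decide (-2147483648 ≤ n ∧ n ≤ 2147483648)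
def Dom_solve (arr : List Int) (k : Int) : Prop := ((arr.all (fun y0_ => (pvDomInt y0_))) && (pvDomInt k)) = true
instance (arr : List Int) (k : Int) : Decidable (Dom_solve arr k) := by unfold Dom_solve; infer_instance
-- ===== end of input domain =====

-- B replaces A's staged max/reflect/max passes with one explicit loop carrying (min, max), then one map per parity branch (even case collapses to x - min(arr)).


-- ===== PORT A =====
def solve (arr : List Int) (k : Int) : List Int :=
  match PySem.List.max? arr (fun x => x) with
  | none => []          -- unreachable under Pre_solve (Python raises ValueError on [])
  | some largest =>
    let new_arr := arr.map (fun i => largest - i)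
    if PySem.Int.mod k 2 == 1 then new_arr
    else
      match PySem.List.max? new_arr (fun x => x) with
      | none => []      -- unreachable: new_arr nonempty when arr is
      | some largest2 => new_arr.map (fun i => largest2 - i)

-- ===== PORT B =====
-- the 'for x in arr[1:]' loop of Source B, state = (mn, mx)
def minmaxLoop : List Int → Int × Int → Int × Int
  | [], st => st
  | x :: rest, (mn, mx) =>
    minmaxLoop rest (if x < mn then (x, mx) else if mx < x then (mn, x) else (mn, mx))

def solve_alt (arr : List Int) (k : Int) : List Int :=
  match PySem.List.pyGet? arr 0 with
  | none => []          -- unreachable under Pre_solve (arr[0] raises IndexError on [])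
  | some a0 =>
    let st := minmaxLoop (PySem.List.slice arr (some 1) none) (a0, a0)
    if PySem.Int.mod k 2 != 0 then arr.map (fun x => st.2 - x)
    else arr.map (fun x => x - st.1)

-- ===== PRECONDITION & SPEC =====
-- Pre_ excludes the empty list, on which Python A raises ValueError (max of empty sequence).
def Pre_solve (arr : List Int) (_k : Int) : Prop := arr ≠ []
instance (arr : List Int) (k : Int) : Decidable (Pre_solve arr k) := by unfold Pre_solve; infer_instance
def pvWitness_solve : List Int × Int := ([3, 1, 2], 2)

def Spec_solve (arr : List Int) (k : Int) (out : List Int) : Prop := out = solve_alt arr k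
instance (arr : List Int) (k : Int) (out : List Int) : Decidable (Spec_solve arr k out) := by unfold Spec_solve; infer_instance

-- ===== CLAIM =====
def Claim_equal_solve : Prop := ∀ (arr : List Int) (k : Int), Dom_solve arr k → Pre_solve arr k → Spec_solve arr k (solve arr k)

-- ===== LEMMAS AND PROOFS =====
-- B's loop computes the running min and max simultaneously
theorem minmaxLoop_eq (t : List Int) : ∀ mn mx : Int, mn ≤ mx →
    minmaxLoop t (mn, mx) = (t.foldl min mn, t.foldl max mx) := by
  induction t with
  | nil => intro mn mx _; rfl
  | cons x t ih =>
    intro mn mx h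
    simp only [minmaxLoop, List.foldl_cons]
    split_ifs with h1 h2
    · rw [ih x mx (by omega)]
      congr 1 <;> [skip; skip] <;> congr 1 <;> omega
    · rw [ih mn x (by omega)]
      congr 1 <;> congr 1 <;> omega
    · rw [ih mn mx h]
      congr 1 <;> congr 1 <;> omega

-- max of the reflected list is c minus the min of the original (running-fold form)
theorem foldl_max_reflect (c : Int) (t : List Int) : ∀ a : Int,
    (t.map (fun i => c - i)).foldl max (c - a) = c - t.foldl min a := by
  induction t with
  | nil => intro a; simp
  | cons x t ih =>
    intro a
    simp only [List.map_cons, List.foldl_cons]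
    have h : max (c - a) (c - x) = c - min a x := by omega
    rw [h, ih]

theorem solve_spec_aux (a : Int) (t : List Int) (k : Int) :
    solve (a :: t) k = solve_alt (a :: t) k := by
  simp only [solve, solve_alt, PySem.List.max?_id_cons, PySem.List.pyGet?_zero_cons,
    PySem.List.slice_from_one, List.tail_cons]
  rw [minmaxLoop_eq t a a le_rfl]
  set c := t.foldl max a with hc
  have hparity : (PySem.Int.mod k 2 == 1) = (PySem.Int.mod k 2 != 0) := by
    have h : PySem.Int.mod k 2 = k % 2 := by simp [PySem.Int.mod, Int.fmod_eq_emod]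
    have h01 : k % 2 = 0 ∨ k % 2 = 1 := by omega
    rcases h01 with h0 | h0 <;> rw [h, h0] <;> rfl
  rw [hparity]
  split_ifs with h
  · rfl
  · have hmax : PySem.List.max? ((a :: t).map (fun i => c - i)) (fun x => x)
        = some (c - t.foldl min a) := by
      simp only [List.map_cons, PySem.List.max?_id_cons]
      exact congrArg some (foldl_max_reflect c t a)
    rw [hmax]
    simp only [List.map_map]
    apply List.map_congr_left
    intro x _
    simp only [Function.comp]
    omega

-- ===== VERDICT =====
theorem solve_spec : Claim_equal_solve := by
  intro arr k _ hpre
  unfold Spec_solve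
  cases arr with
  | nil => exact absurd rfl hpre
  | cons a t => exact solve_spec_aux a t k
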